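-- pv_equiv track=rewrite | github.com/Enigmatisms/Ethians-Alpha-1.1 | equipment/equip.py | attrDesc
-- ===== SOURCE A (Python) =====
-- def attrDesc(attr=None):
--     origin=["Poison Resistance: Lvl. 0 / 4", "Fire Resistance: Lvl. 0 / 4",
--             "Wizardry Resistance: Lvl. 0 / 4 ", "Cryo Resistance: Lvl. 0 / 4",
--             "Blocking Rate: Lvl. 0 / 4"]
--     if not attr: return origin
--     for tag in attr:
--         if tag>=13:
--             if tag in {13, 14, 15, 16}:
--                 poisonR = 17 % tag
--                 origin[0] = "Poison Resistance: Lvl. %d / 4" % poisonR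
--             elif tag in {17, 18, 19, 20}:
--                 fireR = (21 % tag)
--                 origin[1] = "Fire Resistance: Lvl. %d / 4" % fireR
--             elif tag in {21, 22, 23, 24}:
--                 magicR = (25 % tag)
--                 origin[2] = "Wizardry Resistance: Lvl. %d / 4 " % magicR
--             elif tag in {25, 26, 27, 28}:
--                 iceR = (29 % tag)
--                 origin[3] = "Cryo Resistance: Lvl. %d / 4" % iceR
--             elif tag in {29, 30, 31, 32}:
--                 brate = (33 % tag)
--                 origin[4] = "Blocking Rate: Lvl. %d / 4" % brate
--     return origin
-- ===== SOURCE B (Python) =====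
-- def attrDesc(attr=None):
--     templates = ["Poison Resistance: Lvl. %d / 4", "Fire Resistance: Lvl. %d / 4",
--                  "Wizardry Resistance: Lvl. %d / 4 ", "Cryo Resistance: Lvl. %d / 4",
--                  "Blocking Rate: Lvl. %d / 4"]
--     tags = attr or []
--     out = []
--     for i, tmpl in enumerate(templates):
--         s = 13 + 4 * i
--         level = 0
--         for t in reversed(tags):
--             if s <= t <= s + 3:
--                 level = s + 4 - t
--                 break
--         out.append(tmpl % level)
--     return out
-- ===== Notes on version B (the rewrite author's own statement) =====
-- stated objective: alternative
-- what changed: Instead of mutating a slot list per tag in a forward loop with a five-way membership chain, B computes each of the five slots independently by scanning the tag list backwards for the last tag of that slot's group and rendering the template with the closed-form level s+4-t.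
import Mathlib
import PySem

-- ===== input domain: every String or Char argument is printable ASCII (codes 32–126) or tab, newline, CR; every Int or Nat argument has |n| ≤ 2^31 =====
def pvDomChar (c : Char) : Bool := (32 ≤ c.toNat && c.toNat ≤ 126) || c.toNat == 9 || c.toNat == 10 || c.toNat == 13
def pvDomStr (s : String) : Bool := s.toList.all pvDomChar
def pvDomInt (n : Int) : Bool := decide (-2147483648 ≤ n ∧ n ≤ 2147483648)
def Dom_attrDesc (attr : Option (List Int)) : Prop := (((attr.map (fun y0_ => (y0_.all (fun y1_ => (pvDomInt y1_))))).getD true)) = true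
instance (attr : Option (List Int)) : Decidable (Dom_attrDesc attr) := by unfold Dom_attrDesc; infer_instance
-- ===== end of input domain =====

-- B computes each of the five slots independently (last matching tag, closed-form level) instead of A's per-tag forward loop mutating a slot list; alternative decomposition, same cost.


-- ===== PORT A =====
def pvOrigin : List String :=
  ["Poison Resistance: Lvl. 0 / 4", "Fire Resistance: Lvl. 0 / 4",
   "Wizardry Resistance: Lvl. 0 / 4 ", "Cryo Resistance: Lvl. 0 / 4",
   "Blocking Rate: Lvl. 0 / 4"]

def pvUpd (origin : List String) (tag : Int) : List String :=
  if tag ≥ 13 then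
    if tag = 13 ∨ tag = 14 ∨ tag = 15 ∨ tag = 16 then
      origin.set 0 ("Poison Resistance: Lvl. " ++ PySem.Int.toStr (PySem.Int.mod 17 tag) ++ " / 4")
    else if tag = 17 ∨ tag = 18 ∨ tag = 19 ∨ tag = 20 then
      origin.set 1 ("Fire Resistance: Lvl. " ++ PySem.Int.toStr (PySem.Int.mod 21 tag) ++ " / 4")
    else if tag = 21 ∨ tag = 22 ∨ tag = 23 ∨ tag = 24 then
      origin.set 2 ("Wizardry Resistance: Lvl. " ++ PySem.Int.toStr (PySem.Int.mod 25 tag) ++ " / 4 ")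
    else if tag = 25 ∨ tag = 26 ∨ tag = 27 ∨ tag = 28 then
      origin.set 3 ("Cryo Resistance: Lvl. " ++ PySem.Int.toStr (PySem.Int.mod 29 tag) ++ " / 4")
    else if tag = 29 ∨ tag = 30 ∨ tag = 31 ∨ tag = 32 then
      origin.set 4 ("Blocking Rate: Lvl. " ++ PySem.Int.toStr (PySem.Int.mod 33 tag) ++ " / 4")
    else origin
  else origin

def attrDesc (attr : Option (List Int)) : List String :=
  match attr with
  | none => pvOrigin
  | some l => if l = [] then pvOrigin else l.foldl pvUpd pvOrigin

-- ===== PORT B =====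
def pvTemplates : List (String × String) :=
  [("Poison Resistance: Lvl. ", " / 4"), ("Fire Resistance: Lvl. ", " / 4"),
   ("Wizardry Resistance: Lvl. ", " / 4 "), ("Cryo Resistance: Lvl. ", " / 4"),
   ("Blocking Rate: Lvl. ", " / 4")]

-- last tag of the group [s, s+3] wins; level s+4-t, else 0 (the inner for/break of Source B)
def pvLevel (tags : List Int) (s : Int) : Int :=
  match tags.reverse.find? (fun t => decide (s ≤ t) && decide (t ≤ s + 3)) with
  | some t => s + 4 - t
  | none => 0

def attrDesc_alt (attr : Option (List Int)) : List String :=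
  let tags := attr.getD []
  (PySem.List.enumerate pvTemplates).map (fun p =>
    let s : Int := 13 + 4 * p.1
    p.2.1 ++ PySem.Int.toStr (pvLevel tags s) ++ p.2.2)

-- ===== PRECONDITION & SPEC =====
def Spec_attrDesc (attr : Option (List Int)) (out : List String) : Prop := out = attrDesc_alt attr
instance (attr : Option (List Int)) (out : List String) : Decidable (Spec_attrDesc attr out) := by unfold Spec_attrDesc; infer_instance

-- ===== CLAIM (what is proved, stated in full; the proofs are below) =====
def Claim_equal_attrDesc : Prop := ∀ (attr : Option (List Int)), Dom_attrDesc attr → Spec_attrDesc attr (attrDesc attr)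

-- ===== LEMMAS AND PROOFS =====

def pvRender (ts : List Int) : List String :=
  ["Poison Resistance: Lvl. " ++ PySem.Int.toStr (pvLevel ts 13) ++ " / 4",
   "Fire Resistance: Lvl. " ++ PySem.Int.toStr (pvLevel ts 17) ++ " / 4",
   "Wizardry Resistance: Lvl. " ++ PySem.Int.toStr (pvLevel ts 21) ++ " / 4 ",
   "Cryo Resistance: Lvl. " ++ PySem.Int.toStr (pvLevel ts 25) ++ " / 4",
   "Blocking Rate: Lvl. " ++ PySem.Int.toStr (pvLevel ts 29) ++ " / 4"]

lemma pvLevel_append (ts : List Int) (t s : Int) :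
    pvLevel (ts ++ [t]) s = if s ≤ t ∧ t ≤ s + 3 then s + 4 - t else pvLevel ts s := by
  simp only [pvLevel, List.reverse_append, List.reverse_singleton, List.singleton_append,
    List.find?_cons]
  by_cases h : s ≤ t ∧ t ≤ s + 3
  · simp [h.1, h.2]
  · rw [Decidable.not_and_iff_not_or_not] at h
    rcases h with h | h <;> simp [h]

lemma pvFoldl_eq_render (ts : List Int) : ts.foldl pvUpd pvOrigin = pvRender ts := by
  induction ts using List.reverseRecOn with
  | nil => decide
  | append_singleton ts t ih =>
    rw [List.foldl_append, List.foldl_cons, List.foldl_nil, ih]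
    simp only [pvRender, pvLevel_append, pvUpd]
    by_cases h13 : t ≥ 13
    · rw [if_pos h13]
      by_cases g1 : t = 13 ∨ t = 14 ∨ t = 15 ∨ t = 16
      · rw [if_pos g1]
        rcases g1 with h | h | h | h <;> subst h <;>
          simp [List.set]
      · rw [if_neg g1]
        by_cases g2 : t = 17 ∨ t = 18 ∨ t = 19 ∨ t = 20
        · rw [if_pos g2]
          rcases g2 with h | h | h | h <;> subst h <;>
            simp [List.set]
        · rw [if_neg g2]
          by_cases g3 : t = 21 ∨ t = 22 ∨ t = 23 ∨ t = 24
          · rw [if_pos g3]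
            rcases g3 with h | h | h | h <;> subst h <;>
              simp [List.set]
          · rw [if_neg g3]
            by_cases g4 : t = 25 ∨ t = 26 ∨ t = 27 ∨ t = 28
            · rw [if_pos g4]
              rcases g4 with h | h | h | h <;> subst h <;>
                simp [List.set]
            · rw [if_neg g4]
              by_cases g5 : t = 29 ∨ t = 30 ∨ t = 31 ∨ t = 32
              · rw [if_pos g5]
                rcases g5 with h | h | h | h <;> subst h <;>
                  simp [List.set]
              · rw [if_neg g5]
                split_ifs <;> first | rfl | omega
    · rw [if_neg h13]
      split_ifs <;> first | rfl | omega

lemma pvAlt_eq_render (tags : List Int) :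
    attrDesc_alt (some tags) = pvRender tags := by
  simp only [attrDesc_alt, pvTemplates, PySem.List.enumerate, pvRender, Option.getD]
  norm_num [PySem.List.enumerate]

-- ===== VERDICT (by name: the statement is the Claim_ definition above) =====
theorem attrDesc_spec : Claim_equal_attrDesc := by
  intro attr _
  unfold Spec_attrDesc attrDesc
  match attr with
  | none => decide
  | some l =>
    by_cases h : l = []
    · subst h; decide
    · show (if l = [] then pvOrigin else l.foldl pvUpd pvOrigin) = _
      rw [if_neg h, pvFoldl_eq_render, pvAlt_eq_render]
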